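-- pv_equiv track=rewrite | github.com/arceryz/heart-4color | dreducecode/app.py | compute_kempe_sectors
-- ===== SOURCE A (Python) =====
-- def compute_kempe_sectors(coloring: dict, pairing: tuple):
--     sectors = []
--     previous = -1
--     # As byproduct of other code / way rings are in conf file, consecutive nodes in for loop are neighbours in ring
--     for k, v in sorted(coloring.items(), key=lambda t: t[0]):
--         if v in pairing[0]:
--             if previous == 0:
--                 sectors[-1].append(k)
--             else:
--                 sectors.append([k])
--             previous = 0
--         elif v in pairing[1]:
--             if previous == 1:
--                 sectors[-1].append(k)
--             else:
--                 sectors.append([k])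
--             previous = 1
--         else:
--             raise Exception("Color not in any pair!")
--     # Merge if first and last are actually same
--     if ((coloring[sectors[0][0]] in pairing[0] and coloring[sectors[-1][0]] in pairing[0]) or
--             (coloring[sectors[0][0]] in pairing[1] and coloring[sectors[-1][0]] in pairing[1])):
--         if sectors[0] != sectors[-1]:
--             sectors[0] += sectors[-1]
--             sectors.pop(-1)
--
--     return sectors
-- ===== SOURCE B (Python) =====
-- def compute_kempe_sectors(coloring: dict, pairing: tuple):
--     items = sorted(coloring.items(), key=lambda t: t[0])
--     # Pass 1: bucket index (0/1) of every node's color.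
--     buckets = []
--     for _, v in items:
--         if v in pairing[0]:
--             buckets.append(0)
--         elif v in pairing[1]:
--             buckets.append(1)
--         else:
--             raise Exception("Color not in any pair!")
--     # Pass 2: sector label of every position = prefix count of bucket changes.
--     labels = [0] * len(items)
--     for i in range(1, len(items)):
--         labels[i] = labels[i - 1] + (buckets[i] != buckets[i - 1])
--     # Pass 3: sector g collects the keys labelled g.
--     sectors = [[k for (k, _), l in zip(items, labels) if l == g]
--                for g in range(labels[-1] + 1)]
--     # Circular merge: first and last sectors belong to the same pair.
--     c0, cl = coloring[sectors[0][0]], coloring[sectors[-1][0]]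
--     if any(c0 in p and cl in p for p in pairing):
--         if sectors[0] != sectors[-1]:
--             sectors[0] += sectors[-1]
--             sectors.pop(-1)
--     return sectors
-- ===== Notes on version B (the rewrite author's own statement) =====
-- stated objective: alternative
-- what changed: Replaces A's single previous-bucket-tracking loop (append-to-last vs start-new-sector per item) with three staged passes: map every node to its pair bucket, assign each position a sector label by prefix-counting bucket changes, then collect the keys of each label g in range(labels[-1]+1); the circular first+=last merge is kept.
import Mathlib
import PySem

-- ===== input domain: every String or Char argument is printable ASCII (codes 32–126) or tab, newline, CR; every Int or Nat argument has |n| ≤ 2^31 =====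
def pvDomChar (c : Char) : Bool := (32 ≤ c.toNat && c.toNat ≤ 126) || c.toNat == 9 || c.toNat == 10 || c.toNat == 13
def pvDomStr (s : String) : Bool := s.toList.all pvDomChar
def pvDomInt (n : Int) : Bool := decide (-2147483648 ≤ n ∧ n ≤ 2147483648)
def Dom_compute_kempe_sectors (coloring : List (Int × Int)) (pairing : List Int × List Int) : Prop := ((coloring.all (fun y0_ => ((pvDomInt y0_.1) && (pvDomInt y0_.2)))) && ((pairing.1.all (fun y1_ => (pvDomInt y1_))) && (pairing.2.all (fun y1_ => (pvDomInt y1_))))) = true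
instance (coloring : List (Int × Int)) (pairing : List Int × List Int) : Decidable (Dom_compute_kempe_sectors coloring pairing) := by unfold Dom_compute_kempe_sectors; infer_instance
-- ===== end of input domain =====

-- B replaces A's previous-bucket-tracking loop by three staged passes: bucket each node's
-- color, assign every position a sector label by prefix-counting bucket changes, then
-- collect the keys of each label; objective: alternative decomposition, same cost.


-- ===== PORT A =====
-- sectors[-1].append(k)
def pvAppendLast (ss : List (List Int)) (k : Int) : List (List Int) :=
  match ss with
  | [] => []
  | [s] => [s ++ [k]]
  | s :: rest => s :: pvAppendLast rest k

-- one iteration of A's for loop; state = (sectors, previous)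
def pvStepA (pairing : List Int × List Int) (st : List (List Int) × Int) (kv : Int × Int) :
    List (List Int) × Int :=
  if kv.2 ∈ pairing.1 then
    (if st.2 = 0 then pvAppendLast st.1 kv.1 else st.1 ++ [[kv.1]], 0)
  else if kv.2 ∈ pairing.2 then
    (if st.2 = 1 then pvAppendLast st.1 kv.1 else st.1 ++ [[kv.1]], 1)
  else st  -- Python raises Exception("Color not in any pair!") here (excluded by Pre_)

-- A's final circular-merge block
def pvMergeA (pairing : List Int × List Int) (d : PySem.Dict Int Int)
    (sectors : List (List Int)) : List (List Int) :=
  match sectors with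
  | [] => []  -- Python raises IndexError on sectors[0] here (excluded by Pre_)
  | s0 :: rest =>
    let sl := (s0 :: rest).getLast (List.cons_ne_nil s0 rest)
    -- sectors[0][0] / sectors[-1][0]: every sector is built nonempty, so headD is exact
    let c0 := d.getD (s0.headD 0) 0
    let cl := d.getD (sl.headD 0) 0
    if (c0 ∈ pairing.1 ∧ cl ∈ pairing.1) ∨ (c0 ∈ pairing.2 ∧ cl ∈ pairing.2) then
      if s0 ≠ sl then (s0 ++ sl) :: rest.dropLast else s0 :: rest
    else s0 :: rest

def compute_kempe_sectors (coloring : List (Int × Int)) (pairing : List Int × List Int) :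
    List (List Int) :=
  let d := PySem.Dict.ofList coloring
  let ys := PySem.List.sorted d.items (fun t => t.1)
  pvMergeA pairing d (ys.foldl (pvStepA pairing) ([], -1)).1

-- ===== PORT B =====
-- pass 1: bucket of a color; 2 marks the value on which Python B raises (excluded by Pre_)
def pvBucket (pairing : List Int × List Int) (v : Int) : Int :=
  if v ∈ pairing.1 then 0 else if v ∈ pairing.2 then 1 else 2

-- pass 2: the loop 'labels[i] = labels[i-1] + (buckets[i] != buckets[i-1])',
-- carrying the previous bucket and the previous label
def pvLabelsGo (prev lab : Int) : List Int → List Int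
  | [] => []
  | b :: bs => (lab + if b ≠ prev then 1 else 0)
      :: pvLabelsGo b (lab + if b ≠ prev then 1 else 0) bs

def pvLabels : List Int → List Int
  | [] => []
  | b :: bs => 0 :: pvLabelsGo b 0 bs

-- B's final circular-merge block (same code in Source B as in A)
def pvMergeB (pairing : List Int × List Int) (d : PySem.Dict Int Int)
    (sectors : List (List Int)) : List (List Int) :=
  match sectors with
  | [] => []  -- Python raises IndexError on sectors[0] here (excluded by Pre_)
  | s0 :: rest =>
    let sl := (s0 :: rest).getLast (List.cons_ne_nil s0 rest)
    let c0 := d.getD (s0.headD 0) 0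
    let cl := d.getD (sl.headD 0) 0
    if [pairing.1, pairing.2].any (fun p => decide (c0 ∈ p) && decide (cl ∈ p)) then
      if s0 ≠ sl then (s0 ++ sl) :: rest.dropLast else s0 :: rest
    else s0 :: rest

def compute_kempe_sectors_alt (coloring : List (Int × Int)) (pairing : List Int × List Int) :
    List (List Int) :=
  let d := PySem.Dict.ofList coloring
  let ys := PySem.List.sorted d.items (fun t => t.1)
  let buckets := ys.map (fun t => pvBucket pairing t.2)
  let labels := pvLabels buckets
  -- pass 3: '[[k for (k,_),l in zip(items,labels) if l == g] for g in range(labels[-1]+1)]'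
  -- (labels[-1] on the empty coloring raises IndexError in Python; excluded by Pre_)
  let sectors := (PySem.List.pyRange 0 (labels.getLastD 0 + 1) 1).map
    (fun g => ((ys.zip labels).filter (fun p => p.2 == g)).map (fun p => p.1.1))
  pvMergeB pairing d sectors

-- ===== PRECONDITION & SPEC =====
-- Pre_ excludes exactly where A raises: the empty coloring (IndexError on sectors[0]) and a
-- dict value outside both pairing lists (Exception "Color not in any pair!").
def Pre_compute_kempe_sectors (coloring : List (Int × Int)) (pairing : List Int × List Int) : Prop :=
  coloring ≠ [] ∧
  ∀ kv ∈ (PySem.Dict.ofList coloring : PySem.Dict Int Int).items,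
    kv.2 ∈ pairing.1 ∨ kv.2 ∈ pairing.2

instance (coloring : List (Int × Int)) (pairing : List Int × List Int) :
    Decidable (Pre_compute_kempe_sectors coloring pairing) := by
  unfold Pre_compute_kempe_sectors; infer_instance

def pvWitness_compute_kempe_sectors : (List (Int × Int)) × (List Int × List Int) :=
  ([(0, 1), (1, 2), (2, 1), (3, 3)], ([1, 3], [2, 4]))

def Spec_compute_kempe_sectors (coloring : List (Int × Int)) (pairing : List Int × List Int) (out : List (List Int)) : Prop := out = compute_kempe_sectors_alt coloring pairing
instance (coloring : List (Int × Int)) (pairing : List Int × List Int) (out : List (List Int)) : Decidable (Spec_compute_kempe_sectors coloring pairing out) := by unfold Spec_compute_kempe_sectors; infer_instance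

-- ===== CLAIM (what is proved, stated in full; the proofs are below) =====
def Claim_equal_compute_kempe_sectors : Prop := ∀ (coloring : List (Int × Int)) (pairing : List Int × List Int), Dom_compute_kempe_sectors coloring pairing → Pre_compute_kempe_sectors coloring pairing → Spec_compute_kempe_sectors coloring pairing (compute_kempe_sectors coloring pairing)

-- ===== LEMMAS AND PROOFS =====

-- proof-side spec of the grouping both programs compute: maximal same-bucket runs
def pvChunks (pairing : List Int × List Int) : List (Int × Int) → List (List Int)
  | [] => []
  | kv :: rest =>
    let b := pvBucket pairing kv.2
    (kv.1 :: (rest.takeWhile (fun t => pvBucket pairing t.2 == b)).map (·.1)) ::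
      pvChunks pairing (rest.dropWhile (fun t => pvBucket pairing t.2 == b))
termination_by ys => ys.length
decreasing_by
  simp only [List.length_cons]
  exact Nat.lt_succ_of_le (List.length_dropWhile_le _ _)

-- B's sector-g collection '[k for (k,_),l in zip(items,labels) if l == g]'
def pvF (ys : List (Int × Int)) (labels : List Int) (g : Int) : List Int :=
  ((ys.zip labels).filter (fun p => p.2 == g)).map (fun p => p.1.1)

-- B's label-collection pass, as a function of the sorted items (definitionally what port B builds)
def pvSecs (pairing : List Int × List Int) (ys : List (Int × Int)) : List (List Int) :=
  (PySem.List.pyRange 0 ((pvLabels (ys.map (fun t => pvBucket pairing t.2))).getLastD 0 + 1) 1).map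
    (pvF ys (pvLabels (ys.map (fun t => pvBucket pairing t.2))))

theorem pvAppendLast_append (gs : List (List Int)) (g : List Int) (k : Int) :
    pvAppendLast (gs ++ [g]) k = gs ++ [g ++ [k]] := by
  induction gs with
  | nil => rfl
  | cons h t ih =>
    cases t with
    | nil => simp [pvAppendLast]
    | cons h' t' => simpa [pvAppendLast] using ih

theorem pvMergeA_eq_pvMergeB (pairing : List Int × List Int) (d : PySem.Dict Int Int)
    (sectors : List (List Int)) : pvMergeA pairing d sectors = pvMergeB pairing d sectors := by
  cases sectors with
  | nil => rfl
  | cons s0 rest => simp [pvMergeA, pvMergeB, List.any_cons]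

-- A's loop continuing a nonempty sector list whose previous bucket is b ∈ {0,1}
-- equals appending the current run to the last sector and chunking the rest.
theorem foldA_run (pairing : List Int × List Int) (ys : List (Int × Int))
    (hv : ∀ t ∈ ys, t.2 ∈ pairing.1 ∨ t.2 ∈ pairing.2) (gs : List (List Int)) (g : List Int)
    (b : Int) (hb : b = 0 ∨ b = 1) :
    (ys.foldl (pvStepA pairing) (gs ++ [g], b)).1 =
      gs ++ (g ++ (ys.takeWhile (fun t => pvBucket pairing t.2 == b)).map (·.1)) ::
        pvChunks pairing (ys.dropWhile (fun t => pvBucket pairing t.2 == b)) := by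
  induction ys generalizing gs g b with
  | nil => simp only [List.foldl_nil, List.takeWhile_nil, List.dropWhile_nil, pvChunks]; simp
  | cons kv rest ih =>
    have hv' : ∀ t ∈ rest, t.2 ∈ pairing.1 ∨ t.2 ∈ pairing.2 := fun t ht => hv t (by simp [ht])
    by_cases hsame : pvBucket pairing kv.2 = b
    · -- same bucket: append to the last sector
      have hstep : pvStepA pairing (gs ++ [g], b) kv = (gs ++ [g ++ [kv.1]], b) := by
        by_cases h1 : kv.2 ∈ pairing.1
        · have hb0 : b = 0 := by simp [pvBucket, h1] at hsame; omega
          simp [pvStepA, h1, hb0, pvAppendLast_append]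
        · have h2 : kv.2 ∈ pairing.2 := (hv kv (by simp)).resolve_left h1
          have hb1 : b = 1 := by simp [pvBucket, h1, h2] at hsame; omega
          simp [pvStepA, h1, h2, hb1, pvAppendLast_append]
      rw [List.foldl_cons, hstep, ih hv' gs (g ++ [kv.1]) b hb]
      simp [hsame]
    · -- new bucket: start a fresh sector
      have hb' : pvBucket pairing kv.2 = 0 ∨ pvBucket pairing kv.2 = 1 := by
        rcases hv kv (by simp) with h | h
        · left; simp [pvBucket, h]
        · by_cases h1 : kv.2 ∈ pairing.1
          · left; simp [pvBucket, h1]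
          · right; simp [pvBucket, h1, h]
      have hstep : pvStepA pairing (gs ++ [g], b) kv =
          ((gs ++ [g]) ++ [[kv.1]], pvBucket pairing kv.2) := by
        by_cases h1 : kv.2 ∈ pairing.1
        · have hb0 : b ≠ 0 := fun h0 => hsame (by simp [pvBucket, h1, h0])
          simp [pvStepA, h1, pvBucket, hb0]
        · have h2 : kv.2 ∈ pairing.2 := (hv kv (by simp)).resolve_left h1
          have hb1 : b ≠ 1 := fun h0 => hsame (by simp [pvBucket, h1, h2, h0])
          simp [pvStepA, h1, h2, pvBucket, hb1]
      rw [List.foldl_cons, hstep, ih hv' (gs ++ [g]) [kv.1] _ hb']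
      have htw : (kv :: rest).takeWhile (fun t => pvBucket pairing t.2 == b) = [] := by
        simp [hsame]
      have hdw : (kv :: rest).dropWhile (fun t => pvBucket pairing t.2 == b) = kv :: rest := by
        simp [hsame]
      rw [htw, hdw]
      conv_rhs => rw [pvChunks]
      simp

theorem foldA_eq_chunks (pairing : List Int × List Int) (ys : List (Int × Int))
    (hv : ∀ t ∈ ys, t.2 ∈ pairing.1 ∨ t.2 ∈ pairing.2) :
    (ys.foldl (pvStepA pairing) ([], -1)).1 = pvChunks pairing ys := by
  cases ys with
  | nil => simp only [List.foldl_nil, pvChunks]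
  | cons kv rest =>
    have hv' : ∀ t ∈ rest, t.2 ∈ pairing.1 ∨ t.2 ∈ pairing.2 := fun t ht => hv t (by simp [ht])
    have hb' : pvBucket pairing kv.2 = 0 ∨ pvBucket pairing kv.2 = 1 := by
      rcases hv kv (by simp) with h | h
      · left; simp [pvBucket, h]
      · by_cases h1 : kv.2 ∈ pairing.1
        · left; simp [pvBucket, h1]
        · right; simp [pvBucket, h1, h]
    have hstep : pvStepA pairing (([] : List (List Int)), (-1 : Int)) kv =
        ([[kv.1]], pvBucket pairing kv.2) := by
      by_cases h1 : kv.2 ∈ pairing.1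
      · simp [pvStepA, h1, pvBucket]
      · rcases hb' with h | h
        · exact absurd h (by simp [pvBucket, h1]; split_ifs <;> simp)
        · simp [pvStepA, h1, (hv kv (by simp)).resolve_left h1, pvBucket]
    have hrun := foldA_run pairing rest hv' [] [kv.1] _ hb'
    simp only [List.nil_append] at hrun
    rw [List.foldl_cons, hstep, hrun]
    conv_rhs => rw [pvChunks]
    simp

-- ---- facts about pvLabelsGo / pvLabels ----

theorem pvLabelsGo_shift (bs : List Int) (prev lab c : Int) :
    pvLabelsGo prev (lab + c) bs = (pvLabelsGo prev lab bs).map (· + c) := by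
  induction bs generalizing prev lab with
  | nil => rfl
  | cons b bs ih =>
    have harith : lab + c + (if b ≠ prev then 1 else 0)
        = lab + (if b ≠ prev then 1 else 0) + c := by ring
    simp only [pvLabelsGo, List.map_cons, harith, ih]

theorem pvLabelsGo_run (r cs : List Int) (prev lab : Int) (h : ∀ b ∈ r, b = prev) :
    pvLabelsGo prev lab (r ++ cs) = r.map (fun _ => lab) ++ pvLabelsGo prev lab cs := by
  induction r with
  | nil => rfl
  | cons b r ih =>
    have hb : b = prev := h b (by simp)
    subst hb
    simp only [List.cons_append, pvLabelsGo, ne_eq, not_true_eq_false, if_false, add_zero,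
      List.map_cons, List.cons.injEq, true_and]
    exact ih (fun x hx => h x (by simp [hx]))

theorem pvLabelsGo_ge (bs : List Int) (prev lab : Int) :
    ∀ l ∈ pvLabelsGo prev lab bs, lab ≤ l := by
  induction bs generalizing prev lab with
  | nil => intro l hl; simp [pvLabelsGo] at hl
  | cons b bs ih =>
    intro l hl
    simp only [pvLabelsGo, List.mem_cons] at hl
    rcases hl with h | h
    · subst h; split_ifs <;> omega
    · have := ih b (lab + if b ≠ prev then 1 else 0) l h
      split_ifs at this <;> omega

theorem pvLabels_nonneg (bs : List Int) : ∀ l ∈ pvLabels bs, 0 ≤ l := by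
  cases bs with
  | nil => intro l hl; simp [pvLabels] at hl
  | cons b bs =>
    intro l hl
    simp only [pvLabels, List.mem_cons] at hl
    rcases hl with h | h
    · omega
    · exact pvLabelsGo_ge bs b 0 l h

theorem getLastD_nonneg (l : List Int) (d : Int) (hd : 0 ≤ d) (h : ∀ a ∈ l, 0 ≤ a) :
    0 ≤ l.getLastD d := by
  induction l generalizing d with
  | nil => simpa using hd
  | cons a l ih =>
    rw [List.getLastD_cons]
    exact ih a (h a (by simp)) (fun x hx => h x (by simp [hx]))

theorem getLastD_irrel (l : List Int) (d d' : Int) (h : l ≠ []) :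
    l.getLastD d = l.getLastD d' := by
  rw [List.getLastD_eq_getLast?, List.getLastD_eq_getLast?]
  obtain ⟨a, ha⟩ := Option.isSome_iff_exists.mp (List.getLast?_isSome.mpr h)
  simp [ha]

theorem getLastD_map_add_one (l : List Int) (d : Int) :
    (l.map (· + 1)).getLastD (d + 1) = l.getLastD d + 1 := by
  induction l generalizing d with
  | nil => rfl
  | cons a l ih => rw [List.map_cons, List.getLastD_cons, List.getLastD_cons, ih]

theorem getLastD_append_ne_nil (l1 l2 : List Int) (d : Int) (h : l2 ≠ []) :
    (l1 ++ l2).getLastD d = l2.getLastD d := by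
  induction l1 generalizing d with
  | nil => rfl
  | cons a l1 ih =>
    rw [List.cons_append, List.getLastD_cons, ih a]
    exact getLastD_irrel l2 a d h

theorem getLastD_map_const (l : List (Int × Int)) (c : Int) :
    (l.map (fun _ => c)).getLastD c = c := by
  induction l generalizing c with
  | nil => rfl
  | cons a l ih => rw [List.map_cons, List.getLastD_cons]; exact ih c

theorem zip_map_const (l : List (Int × Int)) (c : Int) :
    l.zip (l.map (fun _ => c)) = l.map (fun a => (a, c)) := by
  induction l with
  | nil => rfl
  | cons a l ih => simp only [List.map_cons, List.zip_cons_cons, ih]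

theorem pyRange_succ_shift (m : Int) (h : 0 ≤ m) :
    PySem.List.pyRange 0 (m + 1 + 1) 1 = 0 :: (PySem.List.pyRange 0 (m + 1) 1).map (· + 1) := by
  rw [PySem.List.pyRange_one, PySem.List.pyRange_one]
  have h1 : (m + 1 + 1 - 0).toNat = (m + 1 - 0).toNat + 1 := by omega
  rw [h1, List.range_succ_eq_map]
  simp only [List.map_cons, List.map_map, Nat.cast_zero, add_zero]
  have hfun : ∀ k ∈ List.range (m + 1 - 0).toNat,
      ((fun k : ℕ => (0:ℤ) + ↑k) ∘ Nat.succ) k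
        = ((fun x : ℤ => x + 1) ∘ fun k : ℕ => (0:ℤ) + ↑k) k := by
    intro k _
    simp only [Function.comp_apply, Nat.succ_eq_add_one]
    push_cast
    ring
  rw [List.map_congr_left hfun]

theorem pvChunks_cons (pairing : List Int × List Int) (x : Int × Int) (xs : List (Int × Int)) :
    pvChunks pairing (x :: xs)
      = (x.1 :: (xs.takeWhile (fun t => pvBucket pairing t.2 == pvBucket pairing x.2)).map (·.1))
        :: pvChunks pairing
          (xs.dropWhile (fun t => pvBucket pairing t.2 == pvBucket pairing x.2)) := by
  rw [pvChunks]

theorem pvF_zero (x : Int × Int) (r dd : List (Int × Int)) (tl : List Int)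
    (htl : ∀ a ∈ tl, 0 ≤ a) :
    pvF (x :: (r ++ dd)) (0 :: (r.map (fun _ => (0:Int)) ++ tl.map (· + 1))) 0
      = x.1 :: r.map (·.1) := by
  unfold pvF
  rw [List.zip_cons_cons, List.zip_append (by simp), zip_map_const]
  simp only [List.filter_cons, List.filter_append]
  have hdd : (dd.zip (tl.map (· + 1))).filter (fun q => q.2 == (0:Int)) = [] := by
    rw [List.filter_eq_nil_iff]
    intro q hq
    obtain ⟨t, ht, hqt⟩ := List.mem_map.mp (List.of_mem_zip hq).2
    have := htl t ht
    simp only [beq_iff_eq]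
    omega
  rw [hdd]
  have hr : (r.map (fun a => (a, (0:Int)))).filter (fun q => q.2 == (0:Int))
      = r.map (fun a => (a, (0:Int))) := by
    rw [List.filter_eq_self]
    intro q hq
    obtain ⟨a, _, hqa⟩ := List.mem_map.mp hq
    simp [← hqa]
  rw [hr]
  simp [List.map_map]

theorem pvF_succ (x : Int × Int) (r dd : List (Int × Int)) (tl : List Int) (g : Int)
    (hg : 0 ≤ g) :
    pvF (x :: (r ++ dd)) (0 :: (r.map (fun _ => (0:Int)) ++ tl.map (· + 1))) (g + 1)
      = pvF dd tl g := by
  unfold pvF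
  rw [List.zip_cons_cons, List.zip_append (by simp), zip_map_const]
  simp only [List.filter_cons, List.filter_append]
  have hx : (((x, (0:Int)).2 == g + 1)) = false := by simp; omega
  rw [hx]
  have hr : (r.map (fun a => (a, (0:Int)))).filter (fun q => q.2 == g + 1) = [] := by
    rw [List.filter_eq_nil_iff]
    intro q hq
    obtain ⟨a, _, hqa⟩ := List.mem_map.mp hq
    simp only [← hqa, beq_iff_eq]
    omega
  rw [hr]
  have hdd : (dd.zip (tl.map (· + 1))).filter (fun q => q.2 == g + 1)
      = ((dd.zip tl).filter (fun q => q.2 == g)).map (fun q => (q.1, q.2 + 1)) := by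
    rw [List.zip_map_right, List.filter_map]
    have hpred : ∀ q ∈ dd.zip tl,
        ((fun q : (Int × Int) × Int => q.2 == g + 1) ∘ Prod.map id (· + 1)) q
          = (fun q : (Int × Int) × Int => q.2 == g) q := by
      intro q _
      simp only [Function.comp_apply, Prod.map]
      rw [Bool.eq_iff_iff]
      simp only [beq_iff_eq]
      omega
    rw [List.filter_congr hpred]
    rfl
  rw [hdd]
  simp [List.map_map]

theorem pvChunks_nil (pairing : List Int × List Int) : pvChunks pairing [] = [] := by
  rw [pvChunks]

-- the labels of x :: xs: 0, then 0 for the first run, then the labels of the rest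
theorem labels_cons (pairing : List Int × List Int) (x : Int × Int) (xs : List (Int × Int)) :
    pvLabels ((x :: xs).map (fun t => pvBucket pairing t.2))
      = 0 :: ((xs.takeWhile (fun t => pvBucket pairing t.2 == pvBucket pairing x.2)).map
            (fun _ => (0:Int))
          ++ pvLabelsGo (pvBucket pairing x.2) 0
            ((xs.dropWhile (fun t => pvBucket pairing t.2 == pvBucket pairing x.2)).map
              (fun t => pvBucket pairing t.2))) := by
  conv_lhs => rw [← List.takeWhile_append_dropWhile
    (p := fun t => pvBucket pairing t.2 == pvBucket pairing x.2) (l := xs)]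
  simp only [List.map_cons, List.map_append, pvLabels]
  rw [pvLabelsGo_run]
  · rw [List.map_map]
    rfl
  · intro c hc
    obtain ⟨t, ht, rfl⟩ := List.mem_map.mp hc
    have := List.mem_takeWhile_imp ht
    simpa using this

-- labels of a list opening with a bucket change are one more than its own labels
theorem labelsGo_shiftD (prev b : Int) (bs : List Int) (h : ¬ b = prev) :
    pvLabelsGo prev 0 (b :: bs) = (pvLabels (b :: bs)).map (· + 1) := by
  simp only [pvLabelsGo, pvLabels, List.map_cons, if_pos h]
  rw [pvLabelsGo_shift]

theorem pvSecs_eq_chunks (pairing : List Int × List Int) :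
    ∀ (n : Nat) (ys : List (Int × Int)), ys.length ≤ n → ys ≠ [] →
      pvSecs pairing ys = pvChunks pairing ys := by
  intro n
  induction n with
  | zero =>
    intro ys hlen hne
    cases ys with
    | nil => exact absurd rfl hne
    | cons a l => simp at hlen
  | succ n ih =>
    intro ys hlen hne
    obtain ⟨x, xs, rfl⟩ := List.exists_cons_of_ne_nil hne
    obtain ⟨R, hR⟩ : ∃ R, xs.takeWhile
        (fun t => pvBucket pairing t.2 == pvBucket pairing x.2) = R := ⟨_, rfl⟩
    obtain ⟨D, hD⟩ : ∃ D, xs.dropWhile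
        (fun t => pvBucket pairing t.2 == pvBucket pairing x.2) = D := ⟨_, rfl⟩
    have hxs : R ++ D = xs := by rw [← hR, ← hD]; exact List.takeWhile_append_dropWhile
    have hlab := labels_cons pairing x xs
    rw [hR, hD] at hlab
    have hchunk := pvChunks_cons pairing x xs
    rw [hR, hD] at hchunk
    cases D with
    | nil =>
      have hL : pvLabels ((x :: xs).map (fun t => pvBucket pairing t.2))
          = 0 :: ((R.map (fun _ => (0:Int))) ++ (([]:List Int).map (· + 1))) := by
        rw [hlab]; rfl
      unfold pvSecs
      rw [hL]
      have hm : ((0:Int) :: ((R.map (fun _ => (0:Int))) ++ (([]:List Int).map (· + 1)))).getLastD 0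
          = 0 := by
        rw [List.getLastD_cons]
        simp only [List.map_nil, List.append_nil]
        exact getLastD_map_const R 0
      rw [hm]
      have hrange : PySem.List.pyRange 0 (0 + 1) 1 = [(0:Int)] := by decide
      rw [hrange]
      simp only [List.map_cons, List.map_nil]
      conv_lhs => rw [← hxs]
      have hf := pvF_zero x R [] [] (by simp)
      simp only [List.map_nil, List.append_nil] at hf ⊢
      rw [hf, hchunk, pvChunks_nil]
    | cons y dd' =>
      have hyb : ¬ pvBucket pairing y.2 = pvBucket pairing x.2 := by
        have hw : xs.dropWhile (fun t : Int × Int => pvBucket pairing t.2 == pvBucket pairing x.2)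
            ≠ [] := by
          rw [hD]; simp
        have hhead := List.head_dropWhile_not
          (fun t : Int × Int => pvBucket pairing t.2 == pvBucket pairing x.2) hw
        have hhy : (xs.dropWhile
            (fun t : Int × Int => pvBucket pairing t.2 == pvBucket pairing x.2)).head hw = y := by
          simp [hD]
        rw [hhy] at hhead
        simpa using hhead
      have hgo : pvLabelsGo (pvBucket pairing x.2) 0 ((y :: dd').map (fun t => pvBucket pairing t.2))
          = (pvLabels ((y :: dd').map (fun t => pvBucket pairing t.2))).map (· + 1) := by
        rw [List.map_cons]
        exact labelsGo_shiftD _ _ _ hyb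
      have hL : pvLabels ((x :: xs).map (fun t => pvBucket pairing t.2))
          = 0 :: ((R.map (fun _ => (0:Int)))
              ++ (pvLabels ((y :: dd').map (fun t => pvBucket pairing t.2))).map (· + 1)) := by
        rw [hlab, hgo]
      have htlne : pvLabels ((y :: dd').map (fun t => pvBucket pairing t.2)) ≠ [] := by
        simp [pvLabels]
      have htl_nonneg := pvLabels_nonneg ((y :: dd').map (fun t => pvBucket pairing t.2))
      have hm'0 : 0 ≤ (pvLabels ((y :: dd').map (fun t => pvBucket pairing t.2))).getLastD 0 :=
        getLastD_nonneg _ 0 le_rfl htl_nonneg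
      have hm : (pvLabels ((x :: xs).map (fun t => pvBucket pairing t.2))).getLastD 0
          = (pvLabels ((y :: dd').map (fun t => pvBucket pairing t.2))).getLastD 0 + 1 := by
        rw [hL, List.getLastD_cons,
          getLastD_append_ne_nil _ _ _ (by simpa using htlne),
          getLastD_irrel _ 0 ((pvLabels ((y :: dd').map (fun t => pvBucket pairing t.2))).getLastD 0 + 1)
            (by simpa using htlne),
          getLastD_map_add_one, getLastD_irrel _ _ 0 htlne]
      unfold pvSecs
      rw [hm, pyRange_succ_shift _ hm'0, List.map_cons, List.map_map, hchunk]
      congr 1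
      · rw [hL]
        conv_lhs => rw [← hxs]
        exact pvF_zero x R (y :: dd') _ htl_nonneg
      · have hlen' : (y :: dd').length ≤ n := by
          have h1 : (y :: dd').length ≤ xs.length := by
            rw [← hxs]; simp
          simp only [List.length_cons] at hlen
          omega
        have hrec := ih (y :: dd') hlen' (by simp)
        rw [← hrec]
        unfold pvSecs
        apply List.map_congr_left
        intro g hg
        have hg0 : 0 ≤ g := (PySem.List.mem_pyRange_one.mp hg).1
        show pvF (x :: xs) (pvLabels ((x :: xs).map (fun t => pvBucket pairing t.2))) (g + 1)
          = pvF (y :: dd') (pvLabels ((y :: dd').map (fun t => pvBucket pairing t.2))) g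
        rw [hL]
        conv_lhs => rw [← hxs]
        exact pvF_succ x R (y :: dd') _ g hg0

theorem items_foldl_insert_ne_nil (ps : List (Int × Int)) (d : PySem.Dict Int Int)
    (h : d.items ≠ []) :
    (ps.foldl (fun acc p => acc.insert p.1 p.2) d).items ≠ [] := by
  induction ps generalizing d with
  | nil => exact h
  | cons p ps ih =>
    refine ih _ ?_
    by_cases hc : d.contains p.1 = true
    · simp only [PySem.Dict.insert, hc, if_true]
      simpa using h
    · simp only [PySem.Dict.insert, hc]
      simp

theorem sorted_items_ne_nil (coloring : List (Int × Int)) (h : coloring ≠ []) :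
    PySem.List.sorted (PySem.Dict.ofList coloring : PySem.Dict Int Int).items
      (fun t => t.1) ≠ [] := by
  obtain ⟨c, cs, rfl⟩ := List.exists_cons_of_ne_nil h
  have hitems : (PySem.Dict.ofList (c :: cs) : PySem.Dict Int Int).items ≠ [] := by
    show (List.foldl (fun acc p => acc.insert p.1 p.2) PySem.Dict.empty (c :: cs)).items ≠ []
    rw [List.foldl_cons]
    refine items_foldl_insert_ne_nil cs _ ?_
    simp only [PySem.Dict.insert, PySem.Dict.contains_empty, Bool.false_eq_true, if_false]
    simp
  intro hs
  apply hitems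
  have := PySem.List.length_sorted
    (PySem.Dict.ofList (c :: cs) : PySem.Dict Int Int).items (fun t : Int × Int => t.1) false
  rw [hs] at this
  exact List.eq_nil_of_length_eq_zero this.symm

-- ===== VERDICT (by name: the statement is the Claim_ definition above) =====
theorem compute_kempe_sectors_spec : Claim_equal_compute_kempe_sectors := by
  intro coloring pairing _ hpre
  unfold Spec_compute_kempe_sectors
  show pvMergeA pairing (PySem.Dict.ofList coloring)
      ((PySem.List.sorted (PySem.Dict.ofList coloring).items (fun t => t.1)).foldl
        (pvStepA pairing) ([], -1)).1 =
    pvMergeB pairing (PySem.Dict.ofList coloring)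
      (pvSecs pairing (PySem.List.sorted (PySem.Dict.ofList coloring).items (fun t => t.1)))
  have hne := sorted_items_ne_nil coloring hpre.1
  have hv : ∀ t ∈ PySem.List.sorted (PySem.Dict.ofList coloring : PySem.Dict Int Int).items
      (fun t => t.1), t.2 ∈ pairing.1 ∨ t.2 ∈ pairing.2 := by
    intro t ht
    exact hpre.2 t ((PySem.List.mem_sorted _ _ _ t).mp ht)
  rw [foldA_eq_chunks pairing _ hv, pvMergeA_eq_pvMergeB,
    pvSecs_eq_chunks pairing _ _ le_rfl hne]
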